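-- pv_equiv track=rewrite | github.com/THU-WingTecher/DeepConstr | neuri/constrinf/errmsg.py | delete_btw
-- ===== SOURCE A (Python) =====
-- def delete_btw(msg, start_chr, end_chr, include=False):
--     stack = []
--     to_delete = []
--
--     for i, c in enumerate(msg):
--         if c == start_chr:
--             stack.append(i)
--         elif c == end_chr and stack :
--             start = stack.pop()
--             if not stack:
--                 end = i
--                 if not include:
--                     to_delete.append((start, end))
--                 else:
--                     to_delete.append((start + 1, end - 1))
--
--     # Reverse the list so that we delete from the end of the string first
--     to_delete.reverse()
--
--     for start, end in to_delete:
--         msg = msg[:start] + msg[end + 1:]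
--
--     return msg
-- ===== SOURCE B (Python) =====
-- def delete_btw(msg, start_chr, end_chr, include=False):
--     # One pass: track nesting depth; when a top-level region closes, emit the
--     # surviving segment before it; join all surviving segments at the end.
--     parts = []
--     depth = 0
--     seg = 0           # start of the current surviving segment
--     region_start = 0  # index where the current top-level region opened
--     for i, c in enumerate(msg):
--         if c == start_chr:
--             if depth == 0:
--                 region_start = i
--             depth += 1
--         elif c == end_chr and depth > 0:
--             depth -= 1
--             if depth == 0:
--                 if not include:
--                     parts.append(msg[seg:region_start])
--                     seg = i + 1
--                 else:
--                     parts.append(msg[seg:region_start + 1])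
--                     seg = i
--     parts.append(msg[seg:])
--     return "".join(parts)
-- ===== Notes on version B (the rewrite author's own statement) =====
-- stated objective: alternative
-- what changed: Replaces the index-stack plus per-region whole-string re-slicing with a single pass using a depth counter that collects surviving segments and joins them once.
import Mathlib
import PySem

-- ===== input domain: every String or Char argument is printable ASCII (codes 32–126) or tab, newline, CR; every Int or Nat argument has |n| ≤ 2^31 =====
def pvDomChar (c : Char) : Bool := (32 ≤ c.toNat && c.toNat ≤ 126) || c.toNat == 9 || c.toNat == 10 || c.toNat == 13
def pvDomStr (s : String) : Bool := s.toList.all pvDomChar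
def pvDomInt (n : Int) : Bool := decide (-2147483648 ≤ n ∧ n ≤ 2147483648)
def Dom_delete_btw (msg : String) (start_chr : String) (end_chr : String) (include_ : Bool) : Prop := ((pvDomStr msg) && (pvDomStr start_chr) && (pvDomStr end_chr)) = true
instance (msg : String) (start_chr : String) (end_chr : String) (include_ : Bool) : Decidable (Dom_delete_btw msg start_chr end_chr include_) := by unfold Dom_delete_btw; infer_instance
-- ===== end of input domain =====

-- B replaces A's index-stack + per-region whole-string re-slicing with one depth-counter
-- pass that collects the surviving segments and joins them once (alternative algorithm).


-- ===== PORT A =====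
-- Python compares the 1-char string c with start_chr/end_chr (false for multi-char strings)
def pvChrEq (c : Char) (s : String) : Bool := String.ofList [c] == s

-- A's first for-loop: state (stack, to_delete); stack pushed with append, popped from the end
def aLoop (start_chr end_chr : String) (include_ : Bool) :
    List (Int × Char) → List Int → List (Int × Int) → List (Int × Int)
  | [], _stack, td => td
  | (i, c) :: rest, stack, td =>
    if pvChrEq c start_chr then
      aLoop start_chr end_chr include_ rest (stack ++ [i]) td
    else if pvChrEq c end_chr && !stack.isEmpty then
      let start := stack.getLastD 0      -- stack.pop(); guarded by non-emptiness
      let stack' := stack.dropLast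
      if stack'.isEmpty then
        if !include_ then
          aLoop start_chr end_chr include_ rest stack' (td ++ [(start, i)])
        else
          aLoop start_chr end_chr include_ rest stack' (td ++ [(start + 1, i - 1)])
      else aLoop start_chr end_chr include_ rest stack' td
    else aLoop start_chr end_chr include_ rest stack td

def delete_btw (msg : String) (start_chr : String) (end_chr : String) (include_ : Bool) : String :=
  let td := aLoop start_chr end_chr include_ (PySem.List.enumerate msg.toList) [] []
  let td := td.reverse
  -- second for-loop: msg = msg[:start] + msg[end+1:]
  String.ofList (td.foldl
    (fun l (p : Int × Int) => PySem.List.slice l none (some p.1) ++ PySem.List.slice l (some (p.2 + 1)) none)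
    msg.toList)

-- ===== PORT B =====
-- B's single pass: state (depth, seg, region_start, parts)
def bLoop (l : List Char) (start_chr end_chr : String) (include_ : Bool) :
    List (Int × Char) → Int → Int → Int → List (List Char) → List (List Char) × Int
  | [], _depth, seg, _rs, parts => (parts, seg)
  | (i, c) :: rest, depth, seg, rs, parts =>
    if pvChrEq c start_chr then
      bLoop l start_chr end_chr include_ rest (depth + 1) seg (if depth == 0 then i else rs) parts
    else if pvChrEq c end_chr && decide (0 < depth) then
      if depth - 1 == 0 then
        if !include_ then
          bLoop l start_chr end_chr include_ rest (depth - 1) (i + 1) rs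
            (parts ++ [PySem.List.slice l (some seg) (some rs)])
        else
          bLoop l start_chr end_chr include_ rest (depth - 1) i rs
            (parts ++ [PySem.List.slice l (some seg) (some (rs + 1))])
      else bLoop l start_chr end_chr include_ rest (depth - 1) seg rs parts
    else bLoop l start_chr end_chr include_ rest depth seg rs parts

def delete_btw_alt (msg : String) (start_chr : String) (end_chr : String) (include_ : Bool) : String :=
  let l := msg.toList
  let r := bLoop l start_chr end_chr include_ (PySem.List.enumerate l) 0 0 0 []
  -- parts.append(msg[seg:]); "".join(parts) = concatenation of the segments
  String.ofList ((r.1 ++ [PySem.List.slice l (some r.2) none]).flatten)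

-- ===== PRECONDITION & SPEC =====
def Spec_delete_btw (msg : String) (start_chr : String) (end_chr : String) (include_ : Bool) (out : String) : Prop := out = delete_btw_alt msg start_chr end_chr include_
instance (msg : String) (start_chr : String) (end_chr : String) (include_ : Bool) (out : String) : Decidable (Spec_delete_btw msg start_chr end_chr include_ out) := by unfold Spec_delete_btw; infer_instance

-- ===== CLAIM (what is proved, stated in full; the proofs are below) =====
def Claim_equal_delete_btw : Prop := ∀ (msg : String) (start_chr : String) (end_chr : String) (include_ : Bool), Dom_delete_btw msg start_chr end_chr include_ → Spec_delete_btw msg start_chr end_chr include_ (delete_btw msg start_chr end_chr include_)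

-- ===== LEMMAS AND PROOFS =====

-- the surviving segments of l determined by a deletion-interval list, starting at seg
def segsOf (l : List Char) : Int → List (Int × Int) → List (List Char)
  | seg, [] => [PySem.List.slice l (some seg) none]
  | seg, (s, e) :: rest => PySem.List.slice l (some seg) (some s) :: segsOf l (e + 1) rest

-- intervals are within bounds, in order, and start at or after seg
def WFIv (len : Nat) : Int → List (Int × Int) → Prop
  | seg, [] => 0 ≤ seg
  | seg, (s, e) :: rest => 0 ≤ seg ∧ seg ≤ s ∧ s ≤ e + 1 ∧ e + 1 ≤ (len : Int) ∧ WFIv len (e + 1) rest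

theorem aLoop_acc (start_chr end_chr : String) (include_ : Bool)
    (ps : List (Int × Char)) (stack : List Int) (td : List (Int × Int)) :
    aLoop start_chr end_chr include_ ps stack td
      = td ++ aLoop start_chr end_chr include_ ps stack [] := by
  induction ps generalizing stack td with
  | nil => simp [aLoop]
  | cons p rest ih =>
    obtain ⟨i, c⟩ := p
    simp only [aLoop]
    simp only [List.nil_append]
    split_ifs with h1 h2 h3 h4
    · exact ih _ _
    · rw [ih _ (td ++ _), ih _ [_]]; simp
    · rw [ih _ (td ++ _), ih _ [_]]; simp
    · exact ih _ _
    · exact ih _ _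

theorem bLoop_eq_segs (l : List Char) (start_chr end_chr : String) (include_ : Bool)
    (ps : List (Int × Char)) (stack : List Int) (seg rs : Int) (parts : List (List Char))
    (hhd : ∀ b, stack.head? = some b → b = rs) :
    (bLoop l start_chr end_chr include_ ps (stack.length : Int) seg rs parts).1
      ++ [PySem.List.slice l
          (some (bLoop l start_chr end_chr include_ ps (stack.length : Int) seg rs parts).2) none]
      = parts ++ segsOf l seg (aLoop start_chr end_chr include_ ps stack []) := by
  induction ps generalizing stack seg rs parts with
  | nil => simp [bLoop, aLoop, segsOf]
  | cons p rest ih =>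
    obtain ⟨i, c⟩ := p
    simp only [bLoop, aLoop, List.nil_append]
    by_cases h1 : pvChrEq c start_chr = true
    · -- push
      rw [if_pos h1, if_pos h1]
      rcases stack with _ | ⟨a, t⟩
      · simpa using ih [i] seg i parts (by intro b hb; simp at hb; omega)
      · have hco : (((a :: t).length : Int) == 0) = false := by
          rw [beq_eq_false_iff_ne]
          simp only [List.length_cons]
          push_cast
          omega
        rw [hco]
        simp only [Bool.false_eq_true, if_false]
        have hlen : ((((a :: t) ++ [i]).length : Int)) = ((a :: t).length : Int) + 1 := by
          simp
        rw [← hlen]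
        exact ih ((a :: t) ++ [i]) seg rs parts
          (by intro b hb; exact hhd b (by simpa using hb))
    · rw [if_neg h1, if_neg h1]
      rcases stack with _ | ⟨a, t⟩
      · -- stack empty: both conditions false
        have hA : (pvChrEq c end_chr && !(List.nil (α := Int)).isEmpty) = false := by simp
        have hB : (pvChrEq c end_chr && decide (0 < ((List.nil (α := Int)).length : Int))) = false := by
          simp
        rw [hA, hB]
        simp only [Bool.false_eq_true, if_false]
        exact ih [] seg rs parts hhd
      · by_cases h2 : pvChrEq c end_chr = true
        · have hA : (pvChrEq c end_chr && !(a :: t).isEmpty) = true := by simp [h2]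
          have hB : (pvChrEq c end_chr && decide (0 < (((a :: t).length : Int)))) = true := by
            simp [h2]
          rw [hA, hB]
          simp only [if_true]
          rcases t with _ | ⟨b2, t2⟩
          · -- stack = [a]: a top-level region closes
            have hars : a = rs := hhd a (by simp)
            subst hars
            have hd1 : ((((List.cons a []).length : Int)) - 1 == 0) = true := by norm_num
            rw [hd1]
            simp only [if_true, show (List.cons a []).dropLast = ([] : List Int) from rfl,
              List.isEmpty_nil, if_true, show (List.cons a []).getLastD 0 = a from rfl]
            by_cases hinc : include_ = true
            · subst hinc
              simp only [Bool.not_true, Bool.false_eq_true, if_false]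
              rw [aLoop_acc _ _ _ rest [] [(a + 1, i - 1)]]
              have h0 := ih [] i a (parts ++ [PySem.List.slice l (some seg) (some (a + 1))])
                (by intro b hb; simp at hb)
              simp only [List.length_nil, Nat.cast_zero] at h0
              rw [show (((List.cons a []).length : Int)) - 1 = 0 by simp, h0]
              simp [segsOf, show i - 1 + 1 = i by ring]
            · have hinc' : include_ = false := by simpa using hinc
              subst hinc'
              simp only [Bool.not_false, if_true]
              rw [aLoop_acc _ _ _ rest [] [(a, i)]]
              have h0 := ih [] (i + 1) a (parts ++ [PySem.List.slice l (some seg) (some a)])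
                (by intro b hb; simp at hb)
              simp only [List.length_nil, Nat.cast_zero] at h0
              rw [show (((List.cons a []).length : Int)) - 1 = 0 by simp, h0]
              simp [segsOf]
          · -- stack has ≥ 2 entries: pop, no region closes
            have hd1 : ((((a :: b2 :: t2).length : Int)) - 1 == 0) = false := by
              rw [beq_eq_false_iff_ne]
              simp only [List.length_cons]
              push_cast
              omega
            have hdl : (a :: b2 :: t2).dropLast.isEmpty = false := by
              rw [List.isEmpty_eq_false_iff]
              intro h
              have := congrArg List.length h
              simp [List.length_dropLast] at this
            rw [hd1, hdl]
            simp only [Bool.false_eq_true, if_false]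
            have hlen' : (((a :: b2 :: t2).dropLast.length : Int)) = (((a :: b2 :: t2).length : Int)) - 1 := by
              simp [List.length_dropLast]
            rw [← hlen']
            exact ih (a :: b2 :: t2).dropLast seg rs parts
              (by intro b hb
                  apply hhd
                  rw [← hb]
                  rcases t2 with _ | _ <;> simp [List.dropLast])
        · have hA : (pvChrEq c end_chr && !(a :: t).isEmpty) = false := by simp [h2]
          have hB : (pvChrEq c end_chr && decide (0 < (((a :: t).length : Int)))) = false := by
            simp [h2]
          rw [hA, hB]
          simp only [Bool.false_eq_true, if_false]
          exact ih (a :: t) seg rs parts hhd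

theorem scan_WF (start_chr end_chr : String) (include_ : Bool) (len : Nat)
    (l' : List Char) (n : Int) (stack : List Int) (seg : Int)
    (hseg : 0 ≤ seg)
    (hn : 0 ≤ n)
    (hhd : ∀ b, stack.head? = some b → seg ≤ b)
    (hempty : stack = [] → seg ≤ n)
    (hmem : ∀ j ∈ stack, 0 ≤ j ∧ j < n)
    (hlen : n + (l'.length : Int) ≤ (len : Int)) :
    WFIv len seg (aLoop start_chr end_chr include_ (PySem.List.enumerate l' n) stack []) := by
  induction l' generalizing n stack seg with
  | nil => simpa [PySem.List.enumerate_nil, aLoop, WFIv] using hseg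
  | cons c rest ih =>
    rw [PySem.List.enumerate_cons]
    simp only [aLoop, List.nil_append]
    simp only [List.length_cons] at hlen
    have hlen' : (n + 1) + (rest.length : Int) ≤ (len : Int) := by push_cast at hlen ⊢; omega
    by_cases h1 : pvChrEq c start_chr = true
    · -- push
      rw [if_pos h1]
      refine ih (n + 1) (stack ++ [n]) seg hseg (by omega) ?_ (by simp) ?_ hlen'
      · intro b hb
        rcases stack with _ | ⟨a, t⟩
        · have := hempty rfl; simp at hb; omega
        · exact hhd b (by simpa using hb)
      · intro j hj
        rcases List.mem_append.mp hj with h | h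
        · have := hmem j h; omega
        · simp at h; omega
    · rw [if_neg h1]
      rcases stack with _ | ⟨a, t⟩
      · have hA : (pvChrEq c end_chr && !(List.nil (α := Int)).isEmpty) = false := by simp
        rw [hA]
        simp only [Bool.false_eq_true, if_false]
        refine ih (n + 1) [] seg hseg (by omega) hhd (by intro _; have := hempty rfl; omega) ?_ hlen'
        intro j hj; simp at hj
      · by_cases h2 : pvChrEq c end_chr = true
        · have hA : (pvChrEq c end_chr && !(a :: t).isEmpty) = true := by simp [h2]
          rw [hA]
          simp only [if_true]
          rcases t with _ | ⟨b2, t2⟩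
          · -- region closes: emit
            have ha' := hhd a (by simp)
            have ham := hmem a (by simp)
            simp only [show (List.cons a []).dropLast = ([] : List Int) from rfl,
              List.isEmpty_nil, if_true, show (List.cons a []).getLastD 0 = a from rfl]
            by_cases hinc : include_ = true
            · subst hinc
              simp only [Bool.not_true, Bool.false_eq_true, if_false]
              rw [aLoop_acc _ _ _ (PySem.List.enumerate rest (n + 1)) [] [(a + 1, n - 1)]]
              refine ⟨hseg, by omega, by omega, by omega, ?_⟩
              rw [show n - 1 + 1 = n by ring]
              exact ih (n + 1) [] n (by omega) (by omega) (by intro b hb; simp at hb)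
                (by omega) (by intro j hj; simp at hj) hlen'
            · have hinc' : include_ = false := by simpa using hinc
              subst hinc'
              simp only [Bool.not_false, if_true]
              rw [aLoop_acc _ _ _ (PySem.List.enumerate rest (n + 1)) [] [(a, n)]]
              refine ⟨hseg, by omega, by omega, by omega, ?_⟩
              exact ih (n + 1) [] (n + 1) (by omega) (by omega) (by intro b hb; simp at hb)
                (by omega) (by intro j hj; simp at hj) hlen'
          · -- pop, still nonempty
            have hdl : (a :: b2 :: t2).dropLast.isEmpty = false := by
              rw [List.isEmpty_eq_false_iff]
              intro h
              have := congrArg List.length h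
              simp [List.length_dropLast] at this
            rw [hdl]
            simp only [Bool.false_eq_true, if_false]
            refine ih (n + 1) (a :: b2 :: t2).dropLast seg hseg (by omega) ?_ ?_ ?_ hlen'
            · intro b hb
              apply hhd
              rw [← hb]
              rcases t2 with _ | _ <;> simp [List.dropLast]
            · intro h
              have := congrArg List.length h
              simp [List.length_dropLast] at this
            · intro j hj
              have := hmem j (List.dropLast_subset _ hj); omega
        · have hA : (pvChrEq c end_chr && !(a :: t).isEmpty) = false := by simp [h2]
          rw [hA]
          simp only [Bool.false_eq_true, if_false]
          refine ih (n + 1) (a :: t) seg hseg (by omega) hhd (by intro h; simp at h) ?_ hlen'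
          intro j hj; have := hmem j hj; omega

theorem delete_eq_segs (l : List Char) (td : List (Int × Int)) (seg : Int)
    (hwf : WFIv l.length seg td) :
    td.reverse.foldl
      (fun l' (p : Int × Int) =>
        PySem.List.slice l' none (some p.1) ++ PySem.List.slice l' (some (p.2 + 1)) none)
      l
      = l.take seg.toNat ++ (segsOf l seg td).flatten := by
  induction td generalizing seg with
  | nil =>
    simp only [WFIv] at hwf
    simp [segsOf, PySem.List.slice_from _ hwf]
  | cons p rest ih =>
    obtain ⟨s, e⟩ := p
    obtain ⟨hseg, hs1, hs2, hs3, hwf'⟩ := hwf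
    have hIH := ih (e + 1) hwf'
    rw [List.reverse_cons, List.foldl_append, hIH]
    set R := l.take (e + 1).toNat ++ (segsOf l (e + 1) rest).flatten with hR
    simp only [List.foldl_cons, List.foldl_nil]
    have hlt : (l.take (e + 1).toNat).length = (e + 1).toNat := by
      simp; omega
    have htake : PySem.List.slice R none (some s) = l.take s.toNat := by
      rw [PySem.List.slice_to _ (by omega : (0:Int) ≤ s)]
      rw [hR, List.take_append_of_le_length (by omega)]
      rw [List.take_take]
      congr 1; omega
    have hdrop : PySem.List.slice R (some (e + 1)) none = (segsOf l (e + 1) rest).flatten := by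
      rw [PySem.List.slice_from _ (by omega : (0:Int) ≤ e + 1)]
      rw [hR, List.drop_append_of_le_length (by omega)]
      simp
    rw [htake, hdrop]
    have hsplit : l.take s.toNat = l.take seg.toNat ++ PySem.List.slice l (some seg) (some s) := by
      rw [PySem.List.slice_toNat _ hseg (by omega : (0:Int) ≤ s)]
      rw [show s.toNat = seg.toNat + (s.toNat - seg.toNat) by omega, List.take_add]
      simp
    rw [hsplit]
    simp [segsOf]

-- ===== VERDICT (by name: the statement is the Claim_ definition above) =====
theorem delete_btw_spec : Claim_equal_delete_btw := by
  intro msg start_chr end_chr include_ _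
  unfold Spec_delete_btw delete_btw delete_btw_alt
  set l := msg.toList with hl
  have hWF : WFIv l.length 0 (aLoop start_chr end_chr include_ (PySem.List.enumerate l) [] []) := by
    exact scan_WF start_chr end_chr include_ l.length l 0 [] 0 le_rfl le_rfl
      (by intro b hb; simp at hb) (by intro _; exact le_rfl)
      (by intro j hj; simp at hj) (by simp)
  have hDel := delete_eq_segs l (aLoop start_chr end_chr include_ (PySem.List.enumerate l) [] []) 0 hWF
  have hB := bLoop_eq_segs l start_chr end_chr include_ (PySem.List.enumerate l) [] 0 0 []
    (by intro b hb; simp at hb)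
  simp only [List.length_nil, Nat.cast_zero] at hB
  simp only [hDel, Int.toNat_zero, List.take_zero, List.nil_append]
  rw [List.nil_append] at hB
  congr 1
  rw [← hB]
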